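-- pv_equiv track=rewrite | github.com/sandbox-quantum/Tangelo | tangelo/toolboxes/qubit_mappings/combinatorial.py | one_body_op_on_state
-- ===== SOURCE A (Python) =====
-- def one_body_op_on_state(op, state_in):
--     """Function to apply a a^{\dagger}_i a_j operator as described in Phys. Rev.
--     A 81, 022124 (2010) eq. (8).
--
--     Args:
--         op (tuple): Operator, written as ((qubit_i, 1), (qubit_j, 0)), where 0/1
--             means annihilation/creation on the specified qubit.
--         state_in (tuple): Electronic configuration described as tuple of
--             spinorbital indices where there is an electron.
--
--     Returns:
--         tuple: Resulting state with the same form as in the input state.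
--             Can be 0.
--         int: Phase shift. Can be -1 or 1.
--     """
--
--     assert len(op) == 2, f"Operator {op} has length {len(op)}, but a length of 2 is expected."
--
--     # Copy the state, then transform it into a list (it will be mutated).
--     #state = deepcopy(state_in) # Not need: since state_in is unmutable, list will make a new object
--     state = list(state_in)
--
--     # Unpack the creation and annihilation operators.
--     creation_op, annihilation_op = op
--     creation_qubit, creation_dagger = creation_op
--     annihilation_qubit, annihilation_dagger = annihilation_op
--
--     # Confirm dagger operator to the left.
--     assert creation_dagger == 1, f"The left operator in {op} is not a creation operator."
--     assert annihilation_dagger == 0, f"The right operator in {op} is not an annihilation operator."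
--
--     # annihilation logics on the state.
--     if annihilation_qubit in state: # use state_in.
--         state.remove(annihilation_qubit)
--     else:
--         return (), 0
--
--     # Creation logics on the state.
--     if creation_qubit not in state:
--         state.append(creation_qubit)
--     else:
--         return (), 0
--
--     # Compute the phase shift.
--     if annihilation_qubit > creation_qubit:
--         d = sum(creation_qubit < i < annihilation_qubit for i in state)
--     elif annihilation_qubit < creation_qubit:
--         d = sum(annihilation_qubit < i < creation_qubit for i in state)
--     else:
--         d = 0
--
--     return tuple(sorted(state)), (-1)**d
-- ===== SOURCE B (Python) =====
-- def one_body_op_on_state(op, state_in):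
--     """Apply a^dagger_i a_j to an electronic configuration; Jordan-Wigner
--     two-count phase instead of the single between-count."""
--     assert len(op) == 2, f"Operator {op} has length {len(op)}, but a length of 2 is expected."
--     (creation_qubit, creation_dagger), (annihilation_qubit, annihilation_dagger) = op
--     assert creation_dagger == 1, f"The left operator in {op} is not a creation operator."
--     assert annihilation_dagger == 0, f"The right operator in {op} is not an annihilation operator."
--
--     if annihilation_qubit not in state_in:
--         return (), 0
--     # Parity picked up by the annihilation operator on the original state.
--     p1 = sum(1 for i in state_in if i < annihilation_qubit)
--     intermediate = [i for i in state_in if i != annihilation_qubit]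
--     if creation_qubit in intermediate:
--         return (), 0
--     # Parity picked up by the creation operator on the intermediate state.
--     p2 = sum(1 for i in intermediate if i < creation_qubit)
--     return tuple(sorted(intermediate + [creation_qubit])), (-1) ** (p1 + p2)
-- ===== Notes on version B (the rewrite author's own statement) =====
-- stated objective: alternative
-- what changed: The phase is computed as the Jordan-Wigner product of two parities (occupied orbitals below the annihilation qubit in the original state, and below the creation qubit in the intermediate state) instead of A's single count of orbitals strictly between the two qubits in the final state, and the intermediate state is built by filtering rather than list.remove; Pre_ excludes states where the annihilation index occurs more than once (unphysical double occupation, A's remove-first-copy value there is accidental).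
-- outside the precondition, e.g. on one_body_op_on_state(((1, 1), (0, 0)), (0, 0)): A returns ((0, 1), 1), B returns ((1,), 1)
import Mathlib
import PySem

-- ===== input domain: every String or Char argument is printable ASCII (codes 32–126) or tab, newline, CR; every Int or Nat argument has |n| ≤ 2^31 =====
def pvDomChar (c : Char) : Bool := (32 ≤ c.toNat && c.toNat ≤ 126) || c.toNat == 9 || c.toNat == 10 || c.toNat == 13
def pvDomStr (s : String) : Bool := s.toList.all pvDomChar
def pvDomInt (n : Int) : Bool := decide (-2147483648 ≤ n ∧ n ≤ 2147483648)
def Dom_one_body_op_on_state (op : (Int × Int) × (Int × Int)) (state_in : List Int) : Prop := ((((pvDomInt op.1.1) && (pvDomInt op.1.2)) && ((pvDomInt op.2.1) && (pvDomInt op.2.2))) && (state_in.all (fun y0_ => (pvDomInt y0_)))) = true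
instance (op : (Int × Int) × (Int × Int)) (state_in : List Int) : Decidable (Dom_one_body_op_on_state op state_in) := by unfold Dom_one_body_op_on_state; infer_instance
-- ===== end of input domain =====

-- B computes the phase as the product of two Jordan–Wigner parities (below the annihilation
-- qubit in the original state, below the creation qubit in the intermediate state) instead of
-- A's single between-count on the final state; objective: alternative (same cost).

-- ===== PORT A =====
def one_body_op_on_state (op : (Int × Int) × (Int × Int)) (state_in : List Int) : List Int × Int :=
  let state := state_in
  let creation_qubit := op.1.1
  let annihilation_qubit := op.2.1
  if annihilation_qubit ∈ state then
    match PySem.List.remove? state annihilation_qubit with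
    | none => ([], 0)  -- unreachable: membership was just checked
    | some state =>
      if creation_qubit ∉ state then
        let state := state ++ [creation_qubit]
        let d : Nat :=
          if annihilation_qubit > creation_qubit then
            state.countP (fun i => decide (creation_qubit < i ∧ i < annihilation_qubit))
          else if annihilation_qubit < creation_qubit then
            state.countP (fun i => decide (annihilation_qubit < i ∧ i < creation_qubit))
          else 0
        (PySem.List.sorted state (fun x => x) false, (-1) ^ d)
      else ([], 0)
  else ([], 0)

-- ===== PORT B =====
def one_body_op_on_state_alt (op : (Int × Int) × (Int × Int)) (state_in : List Int) : List Int × Int :=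
  let creation_qubit := op.1.1
  let annihilation_qubit := op.2.1
  if annihilation_qubit ∉ state_in then ([], 0)
  else
    let p1 : Nat := state_in.countP (fun i => decide (i < annihilation_qubit))
    let intermediate := state_in.filter (fun i => decide (i ≠ annihilation_qubit))
    if creation_qubit ∈ intermediate then ([], 0)
    else
      let p2 : Nat := intermediate.countP (fun i => decide (i < creation_qubit))
      (PySem.List.sorted (intermediate ++ [creation_qubit]) (fun x => x) false, (-1) ^ (p1 + p2))

-- ===== PRECONDITION & SPEC =====
-- Pre_ excludes inputs where A's asserts fail (dagger flags not (1,0): AssertionError), and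
-- configurations in which the annihilation qubit index occurs more than once — an unphysical
-- double occupation on which A's remove-first-copy behaviour and its phase are accidental
-- artefacts; B treats that orbital as a single occupation there.
def Pre_one_body_op_on_state (op : (Int × Int) × (Int × Int)) (state_in : List Int) : Prop :=
  op.1.2 = 1 ∧ op.2.2 = 0 ∧ state_in.count op.2.1 ≤ 1
instance (op : (Int × Int) × (Int × Int)) (state_in : List Int) : Decidable (Pre_one_body_op_on_state op state_in) := by unfold Pre_one_body_op_on_state; infer_instance
def pvWitness_one_body_op_on_state : ((Int × Int) × (Int × Int)) × List Int := (((2, 1), (0, 0)), [0, 1])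

def Spec_one_body_op_on_state (op : (Int × Int) × (Int × Int)) (state_in : List Int) (out : List Int × Int) : Prop := out = one_body_op_on_state_alt op state_in
instance (op : (Int × Int) × (Int × Int)) (state_in : List Int) (out : List Int × Int) : Decidable (Spec_one_body_op_on_state op state_in out) := by unfold Spec_one_body_op_on_state; infer_instance

-- ===== CLAIM (what is proved, stated in full; the proofs are below) =====
def Claim_equal_one_body_op_on_state : Prop := ∀ (op : (Int × Int) × (Int × Int)) (state_in : List Int), Dom_one_body_op_on_state op state_in → Pre_one_body_op_on_state op state_in → Spec_one_body_op_on_state op state_in (one_body_op_on_state op state_in)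

-- ===== LEMMAS AND PROOFS =====

-- when a value occurs at most once, erasing its first copy is filtering it out
lemma pv_erase_eq_filter (a : Int) (l : List Int) (h : l.count a ≤ 1) :
    l.erase a = l.filter (fun i => decide (i ≠ a)) := by
  induction l with
  | nil => rfl
  | cons x t ih =>
    by_cases hx : x = a
    · subst hx
      have ht : x ∉ t := by
        rw [← List.count_eq_zero]
        have h2 : (x :: t).count x = t.count x + 1 := List.count_cons_self
        omega
      rw [List.erase_cons_head, List.filter_cons_of_neg (by simp)]
      exact (List.filter_eq_self.mpr (fun y hy => by
        simp only [decide_eq_true_eq]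
        exact fun hyx => ht (hyx ▸ hy))).symm
    · rw [List.erase_cons_tail (by simp [hx])]
      have hct : t.count a ≤ 1 := by
        have h2 : (x :: t).count a = t.count a + if x == a then 1 else 0 := List.count_cons
        omega
      simp [hx, ih hct]

-- same parity: for a ≤ c and a,c ∉ S, #{i<a} + #{i<c} ≡ #{a<i<c} (mod 2)
lemma pv_count_parity (a c : Int) (S : List Int) (hac : a ≤ c) (ha : a ∉ S) (hc : c ∉ S) :
    (S.countP (fun i => decide (i < a)) + S.countP (fun i => decide (i < c))) % 2
      = (S.countP (fun i => decide (a < i ∧ i < c))) % 2 := by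
  induction S with
  | nil => rfl
  | cons x t ih =>
    simp only [List.mem_cons, not_or] at ha hc
    have hx : x ≠ a := fun h => ha.1 h.symm
    have hx' : x ≠ c := fun h => hc.1 h.symm
    have ih' := ih ha.2 hc.2
    simp only [List.countP_cons, decide_eq_true_eq]
    by_cases h1 : x < a
    · rw [if_pos h1, if_pos (show x < c by omega),
        if_neg (show ¬ (a < x ∧ x < c) by omega)]
      omega
    · by_cases h2 : x < c
      · have hax : a < x := by
          rcases lt_or_eq_of_le (le_of_not_gt h1) with h | h
          · exact h
          · exact absurd h.symm hx
        rw [if_neg h1, if_pos h2, if_pos ⟨hax, h2⟩]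
        omega
      · rw [if_neg h1, if_neg h2, if_neg (show ¬ (a < x ∧ x < c) by omega)]
        omega

lemma pv_pow_parity (m n : Nat) (h : m % 2 = n % 2) : ((-1 : Int)) ^ m = (-1) ^ n := by
  rcases Nat.even_or_odd m with hm | hm
  · have hn : Even n := by rw [Nat.even_iff] at *; omega
    rw [hm.neg_one_pow, hn.neg_one_pow]
  · have hn : Odd n := by rw [Nat.odd_iff] at *; omega
    rw [hm.neg_one_pow, hn.neg_one_pow]

-- ===== VERDICT (by name: the statement is the Claim_ definition above) =====
theorem one_body_op_on_state_spec : Claim_equal_one_body_op_on_state := by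
  intro op state_in _hdom hpre
  obtain ⟨⟨c, cd⟩, a, ad⟩ := op
  obtain ⟨-, -, hcnt⟩ := hpre
  unfold Spec_one_body_op_on_state one_body_op_on_state one_body_op_on_state_alt
  dsimp only
  by_cases hmem : a ∈ state_in
  · rw [if_pos hmem, if_neg (not_not_intro hmem),
      PySem.List.remove?_eq_some_erase state_in a hmem]
    dsimp only
    have herase : state_in.erase a = state_in.filter (fun i => decide (i ≠ a)) :=
      pv_erase_eq_filter a state_in hcnt
    rw [herase]
    have haF : a ∉ state_in.filter (fun i => decide (i ≠ a)) := by
      simp [List.mem_filter]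
    have hperm : state_in.Perm (a :: state_in.filter (fun i => decide (i ≠ a))) := by
      rw [← herase]; exact List.perm_cons_erase hmem
    set F := state_in.filter (fun i => decide (i ≠ a)) with hF
    by_cases hcm : c ∈ F
    · rw [if_neg (not_not_intro hcm), if_pos hcm]
    · rw [if_pos hcm, if_neg hcm]
      refine Prod.ext rfl ?_
      have hp1 : state_in.countP (fun i => decide (i < a)) = F.countP (fun i => decide (i < a)) := by
        rw [hperm.countP_eq]
        simp
      dsimp only
      rw [hp1]
      have hlast : ∀ (p : Int → Bool), (F ++ [c]).countP p = F.countP p + (if p c then 1 else 0) := by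
        intro p; simp [List.countP_append, List.countP_cons]
      rcases lt_trichotomy a c with h | h | h
      · rw [if_neg (by omega), if_pos h, hlast]
        simp only [show decide (a < c ∧ c < c) = false by simp, if_false, add_zero,
          Bool.false_eq_true]
        exact (pv_pow_parity _ _ (pv_count_parity a c F (le_of_lt h) haF hcm)).symm
      · subst h
        rw [if_neg (by omega), if_neg (by omega)]
        exact (Even.neg_one_pow ⟨_, rfl⟩).symm
      · rw [if_pos h, hlast]
        simp only [show decide (c < c ∧ c < a) = false by simp, if_false, add_zero,
          Bool.false_eq_true]
        refine (pv_pow_parity _ _ ?_).symm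
        rw [Nat.add_comm]
        exact pv_count_parity c a F (le_of_lt h) hcm haF
  · simp [hmem]
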